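-- pv_equiv track=rewrite | github.com/BridgerB/the-farmer-was-replaced | Save0/sim_dino_size.py | calc_ticks_for_size
-- ===== SOURCE A (Python) =====
-- def calc_ticks_for_size(world_size):
-- 	total_cells = world_size * world_size
-- 	ticks = 400
-- 	total_ticks = 0
-- 	for i in range(total_cells):
-- 		total_ticks = total_ticks + ticks
-- 		ticks = ticks - (ticks * 3) // 100
-- 	return total_ticks
-- ===== SOURCE B (Python) =====
-- def calc_ticks_for_size(world_size):
-- 	n = world_size * world_size
-- 	# stage 1: materialise the decay sequence once (99 values, fixed point 33)
-- 	seq = []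
-- 	t = 400
-- 	while t * 3 // 100 != 0:
-- 		seq.append(t)
-- 		t = t - t * 3 // 100
-- 	# stage 2: prefix sum of the sequence plus constant tail
-- 	return sum(seq[:n]) + t * max(0, n - len(seq))
-- ===== Notes on version B (the rewrite author's own statement) =====
-- stated objective: faster
-- what changed: B materialises the decay sequence once as a list (it reaches its fixed point 33 after 99 steps) and computes the answer as a prefix sum of that list plus fixed_point*(remaining cells), instead of running the accumulator loop over all world_size^2 cells.
import Mathlib
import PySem

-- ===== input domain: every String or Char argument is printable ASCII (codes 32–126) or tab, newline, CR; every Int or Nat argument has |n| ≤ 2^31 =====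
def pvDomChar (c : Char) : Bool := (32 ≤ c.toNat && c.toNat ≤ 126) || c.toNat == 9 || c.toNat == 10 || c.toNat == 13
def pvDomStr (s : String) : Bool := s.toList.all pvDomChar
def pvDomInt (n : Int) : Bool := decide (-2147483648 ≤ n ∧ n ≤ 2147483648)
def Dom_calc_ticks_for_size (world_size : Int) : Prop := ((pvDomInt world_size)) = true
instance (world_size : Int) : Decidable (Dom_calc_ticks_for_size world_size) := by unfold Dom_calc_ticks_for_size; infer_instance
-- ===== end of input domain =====

-- B precomputes the decay sequence once as a list and answers with a prefix sum plus constant tail: O(1) instead of O(world_size^2).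


-- ===== PORT A =====
-- A's for-loop over range(total_cells): structural recursion on the remaining iteration count,
-- carrying the same state (ticks, total_ticks); '//' is PySem.Int.floordiv.
def calcLoopA : Nat → Int → Int → Int
  | 0, _, total_ticks => total_ticks
  | n + 1, ticks, total_ticks =>
      calcLoopA n (ticks - PySem.Int.floordiv (ticks * 3) 100) (total_ticks + ticks)

def calc_ticks_for_size (world_size : Int) : Int :=
  let total_cells := world_size * world_size
  calcLoopA total_cells.toNat 400 0

-- ===== PORT B =====
-- B's while loop building the decay list and returning it with the final (fixed-point) t.
-- Fuel only makes the loop total: t starts at 400 and strictly decreases while the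
-- condition holds, so 400 units of fuel are never exhausted on the actual call.
def decayB : Nat → Int → List Int × Int
  | 0, t => ([], t)
  | f + 1, t =>
      if PySem.Int.floordiv (t * 3) 100 = 0 then ([], t)
      else
        let r := decayB f (t - PySem.Int.floordiv (t * 3) 100)
        (t :: r.1, r.2)

def calc_ticks_for_size_alt (world_size : Int) : Int :=
  let n := (world_size * world_size).toNat
  let r := decayB 400 400
  (r.1.take n).sum + r.2 * ((n - r.1.length : Nat) : Int)

-- ===== PRECONDITION & SPEC =====
def Spec_calc_ticks_for_size (world_size : Int) (out : Int) : Prop := out = calc_ticks_for_size_alt world_size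
instance (world_size : Int) (out : Int) : Decidable (Spec_calc_ticks_for_size world_size out) := by unfold Spec_calc_ticks_for_size; infer_instance

-- ===== CLAIM (what is proved, stated in full; the proofs are below) =====
def Claim_equal_calc_ticks_for_size : Prop := ∀ (world_size : Int), Dom_calc_ticks_for_size world_size → Spec_calc_ticks_for_size world_size (calc_ticks_for_size world_size)

-- ===== LEMMAS AND PROOFS =====
-- Once ticks is at its fixed point, A's loop just adds ticks n times.
lemma calcLoopA_fix (t : Int) (h : PySem.Int.floordiv (t * 3) 100 = 0) :
    ∀ (n : Nat) (s : Int), calcLoopA n t s = s + t * n := by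
  intro n
  induction n with
  | zero => intro s; simp [calcLoopA]
  | succ n ih =>
      intro s
      simp only [calcLoopA, h, sub_zero]
      rw [ih]
      push_cast
      ring

-- If the fuel sufficed (the returned t is at the fixed point), A's loop on any n equals
-- prefix-sum of the decay list plus fixed-point times the remaining count.
lemma calcLoopA_eq_decay :
    ∀ (f : Nat) (t : Int),
      PySem.Int.floordiv ((decayB f t).2 * 3) 100 = 0 →
      ∀ (n : Nat) (s : Int),
        calcLoopA n t s =
          s + ((decayB f t).1.take n).sum
            + (decayB f t).2 * ((n - (decayB f t).1.length : Nat) : Int) := by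
  intro f
  induction f with
  | zero =>
      intro t h n s
      simp only [decayB] at h ⊢
      rw [calcLoopA_fix t h]
      simp
  | succ f ih =>
      intro t h n s
      by_cases h0 : PySem.Int.floordiv (t * 3) 100 = 0
      · simp only [decayB, h0, if_pos] at h ⊢
        rw [calcLoopA_fix t h0]
        simp
      · simp only [decayB, h0, if_neg, not_false_iff] at h ⊢
        cases n with
        | zero => simp [calcLoopA]
        | succ m =>
            simp only [calcLoopA, List.take_succ_cons, List.sum_cons, List.length_cons]
            rw [ih _ h m (s + t)]
            have : (m + 1) - ((decayB f (t - PySem.Int.floordiv (t * 3) 100)).1.length + 1)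
                 = m - (decayB f (t - PySem.Int.floordiv (t * 3) 100)).1.length := by omega
            rw [this]
            ring

-- ===== VERDICT (by name: the statement is the Claim_ definition above) =====
theorem calc_ticks_for_size_spec : Claim_equal_calc_ticks_for_size := by
  intro ws _
  unfold Spec_calc_ticks_for_size calc_ticks_for_size calc_ticks_for_size_alt
  have hfix : PySem.Int.floordiv ((decayB 400 400).2 * 3) 100 = 0 := by decide
  simpa using calcLoopA_eq_decay 400 400 hfix (ws * ws).toNat 0
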